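-- pv_equiv track=rewrite | github.com/pypi-data/pypi-mirror-395 | packages/ciris-agent/ciris_agent-1.7.1-py3-none-any.whl/ciris_engine/logic/adapters/api/routes/system.py | _get_service_category
-- ===== SOURCE A (Python) =====
-- def _get_service_category(service_type_enum: str) -> str:
--     """Get the service category based on the service type enum."""
--     # Tool Services (need to check first due to SECRETS_TOOL containing SECRETS)
--     if "TOOL" in service_type_enum:
--         return "tool"
--
--     # Adapter Services (Communication is adapter-specific)
--     elif "COMMUNICATION" in service_type_enum:
--         return "adapter"
--
--     # Runtime Services (need to check RUNTIME_CONTROL before SECRETS in infrastructure)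
--     elif any(service in service_type_enum for service in ["LLM", "RUNTIME_CONTROL", "TASK_SCHEDULER"]):
--         return "runtime"
--
--     # Graph Services (6)
--     elif any(
--         service in service_type_enum
--         for service in ["MEMORY", "CONFIG", "TELEMETRY", "AUDIT", "INCIDENT_MANAGEMENT", "TSDB_CONSOLIDATION"]
--     ):
--         return "graph"
--
--     # Infrastructure Services (7)
--     elif any(
--         service in service_type_enum
--         for service in [
--             "TIME",
--             "SECRETS",
--             "AUTHENTICATION",
--             "RESOURCE_MONITOR",
--             "DATABASE_MAINTENANCE",
--             "INITIALIZATION",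
--             "SHUTDOWN",
--         ]
--     ):
--         return "infrastructure"
--
--     # Governance Services (4)
--     elif any(
--         service in service_type_enum
--         for service in ["WISE_AUTHORITY", "ADAPTIVE_FILTER", "VISIBILITY", "SELF_OBSERVATION"]
--     ):
--         return "governance"
--
--     else:
--         return "unknown"
-- ===== SOURCE B (Python) =====
-- # Exhaustive matching with a best-priority accumulator: instead of a short-circuit
-- # branch cascade, B scans ALL keyword rules, and keeps the match of lowest priority.
-- _RULES = [
--     ("TOOL", 0, "tool"),
--     ("COMMUNICATION", 1, "adapter"),
--     ("LLM", 2, "runtime"),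
--     ("RUNTIME_CONTROL", 2, "runtime"),
--     ("TASK_SCHEDULER", 2, "runtime"),
--     ("MEMORY", 3, "graph"),
--     ("CONFIG", 3, "graph"),
--     ("TELEMETRY", 3, "graph"),
--     ("AUDIT", 3, "graph"),
--     ("INCIDENT_MANAGEMENT", 3, "graph"),
--     ("TSDB_CONSOLIDATION", 3, "graph"),
--     ("TIME", 4, "infrastructure"),
--     ("SECRETS", 4, "infrastructure"),
--     ("AUTHENTICATION", 4, "infrastructure"),
--     ("RESOURCE_MONITOR", 4, "infrastructure"),
--     ("DATABASE_MAINTENANCE", 4, "infrastructure"),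
--     ("INITIALIZATION", 4, "infrastructure"),
--     ("SHUTDOWN", 4, "infrastructure"),
--     ("WISE_AUTHORITY", 5, "governance"),
--     ("ADAPTIVE_FILTER", 5, "governance"),
--     ("VISIBILITY", 5, "governance"),
--     ("SELF_OBSERVATION", 5, "governance"),
-- ]
--
-- def _get_service_category(service_type_enum: str) -> str:
--     best_prio = None
--     best_cat = "unknown"
--     for kw, prio, cat in _RULES:
--         if kw in service_type_enum and (best_prio is None or prio < best_prio):
--             best_prio, best_cat = prio, cat
--     return best_cat
-- ===== Notes on version B (the rewrite author's own statement) =====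
-- stated objective: alternative
-- what changed: Instead of a six-branch short-circuit elif cascade that returns at the first matching group, B does an exhaustive scan over a flat list of (keyword, priority, category) rules with a best-so-far accumulator and returns the category of the lowest-priority matching rule.
import Mathlib
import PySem

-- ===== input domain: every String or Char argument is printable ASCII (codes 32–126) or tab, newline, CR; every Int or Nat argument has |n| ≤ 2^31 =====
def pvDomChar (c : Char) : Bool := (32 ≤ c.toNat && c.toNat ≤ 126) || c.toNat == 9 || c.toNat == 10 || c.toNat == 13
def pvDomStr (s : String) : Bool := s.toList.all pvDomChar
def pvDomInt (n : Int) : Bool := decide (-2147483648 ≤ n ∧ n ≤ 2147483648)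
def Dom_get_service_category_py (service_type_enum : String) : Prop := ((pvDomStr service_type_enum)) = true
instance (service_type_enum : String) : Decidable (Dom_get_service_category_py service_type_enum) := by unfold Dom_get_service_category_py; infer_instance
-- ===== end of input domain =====

-- B replaces A's short-circuit elif cascade by an exhaustive scan of all keyword rules keeping the lowest-priority match (objective: alternative).


-- ===== PORT A =====
def get_service_category_py (service_type_enum : String) : String :=
  if PySem.Str.isIn "TOOL" service_type_enum then "tool"
  else if PySem.Str.isIn "COMMUNICATION" service_type_enum then "adapter"
  else if (["LLM", "RUNTIME_CONTROL", "TASK_SCHEDULER"]).any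
      (fun service => PySem.Str.isIn service service_type_enum) then "runtime"
  else if (["MEMORY", "CONFIG", "TELEMETRY", "AUDIT", "INCIDENT_MANAGEMENT", "TSDB_CONSOLIDATION"]).any
      (fun service => PySem.Str.isIn service service_type_enum) then "graph"
  else if (["TIME", "SECRETS", "AUTHENTICATION", "RESOURCE_MONITOR", "DATABASE_MAINTENANCE",
            "INITIALIZATION", "SHUTDOWN"]).any
      (fun service => PySem.Str.isIn service service_type_enum) then "infrastructure"
  else if (["WISE_AUTHORITY", "ADAPTIVE_FILTER", "VISIBILITY", "SELF_OBSERVATION"]).any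
      (fun service => PySem.Str.isIn service service_type_enum) then "governance"
  else "unknown"

-- ===== PORT B =====
def pvRules : List (String × Int × String) :=
  [ ("TOOL", 0, "tool"),
    ("COMMUNICATION", 1, "adapter"),
    ("LLM", 2, "runtime"), ("RUNTIME_CONTROL", 2, "runtime"), ("TASK_SCHEDULER", 2, "runtime"),
    ("MEMORY", 3, "graph"), ("CONFIG", 3, "graph"), ("TELEMETRY", 3, "graph"),
    ("AUDIT", 3, "graph"), ("INCIDENT_MANAGEMENT", 3, "graph"), ("TSDB_CONSOLIDATION", 3, "graph"),
    ("TIME", 4, "infrastructure"), ("SECRETS", 4, "infrastructure"), ("AUTHENTICATION", 4, "infrastructure"),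
    ("RESOURCE_MONITOR", 4, "infrastructure"), ("DATABASE_MAINTENANCE", 4, "infrastructure"),
    ("INITIALIZATION", 4, "infrastructure"), ("SHUTDOWN", 4, "infrastructure"),
    ("WISE_AUTHORITY", 5, "governance"), ("ADAPTIVE_FILTER", 5, "governance"),
    ("VISIBILITY", 5, "governance"), ("SELF_OBSERVATION", 5, "governance") ]

-- the loop body of B: keep the lowest-priority matching rule seen so far
def pvStep (s : String) (best : Option Int × String) (rule : String × Int × String) : Option Int × String :=
  if PySem.Str.isIn rule.1 s &&
     (match best.1 with | none => true | some v => decide (rule.2.1 < v))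
  then (some rule.2.1, rule.2.2) else best

def get_service_category_py_alt (service_type_enum : String) : String :=
  (pvRules.foldl (pvStep service_type_enum) (none, "unknown")).2

-- ===== PRECONDITION & SPEC =====
def Spec_get_service_category_py (service_type_enum : String) (out : String) : Prop := out = get_service_category_py_alt service_type_enum
instance (service_type_enum : String) (out : String) : Decidable (Spec_get_service_category_py service_type_enum out) := by unfold Spec_get_service_category_py; infer_instance

-- ===== CLAIM (what is proved, stated in full; the proofs are below) =====
def Claim_equal_get_service_category_py : Prop := ∀ (service_type_enum : String), Dom_get_service_category_py service_type_enum → Spec_get_service_category_py service_type_enum (get_service_category_py service_type_enum)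

-- ===== LEMMAS AND PROOFS =====

-- once the accumulator holds priority p and every remaining rule has priority >= p, the fold is stuck
lemma pvStuck (s : String) (p : Int) (c : String) (rs : List (String × Int × String))
    (h : ∀ r ∈ rs, p ≤ r.2.1) :
    rs.foldl (pvStep s) (some p, c) = (some p, c) := by
  induction rs with
  | nil => rfl
  | cons r rs ih =>
    have hd : decide (r.2.1 < p) = false := decide_eq_false (not_lt.mpr (h r (by simp)))
    simp only [List.foldl_cons, pvStep, hd, Bool.and_false]
    simp only [Bool.false_eq_true, if_false]
    exact ih (fun r hr => h r (by simp [hr]))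

-- folding one priority group from an empty accumulator: first match wins the whole group
lemma pvGroup (s : String) (p : Int) (c : String) (kws : List String) (c0 : String) :
    ((kws.map (fun k => (k, p, c))).foldl (pvStep s) (none, c0)) =
      (if (kws.any (fun k => PySem.Str.isIn k s)) = true then (some p, c) else (none, c0)) := by
  induction kws with
  | nil => simp
  | cons k ks ih =>
    by_cases h : PySem.Str.isIn k s = true
    · simp only [List.map_cons, List.foldl_cons, pvStep, h, Bool.true_and, List.any_cons,
        Bool.true_or]
      simp only [if_true]
      exact pvStuck s p c _ (by intro r hr; simp at hr; obtain ⟨k', _, rfl⟩ := hr; simp)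
    · have h' : PySem.Str.isIn k s = false := by simpa using h
      simp only [List.map_cons, List.foldl_cons, pvStep, h', Bool.false_and, List.any_cons,
        Bool.false_or, Bool.false_eq_true, if_false]
      exact ih

-- ===== VERDICT (by name: the statement is the Claim_ definition above) =====
theorem get_service_category_py_spec : Claim_equal_get_service_category_py := by
  intro s _
  unfold Spec_get_service_category_py get_service_category_py get_service_category_py_alt
  have hr : pvRules =
      (["TOOL"].map (fun k => (k, (0:Int), "tool"))) ++
      (["COMMUNICATION"].map (fun k => (k, (1:Int), "adapter"))) ++
      (["LLM", "RUNTIME_CONTROL", "TASK_SCHEDULER"].map (fun k => (k, (2:Int), "runtime"))) ++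
      (["MEMORY", "CONFIG", "TELEMETRY", "AUDIT", "INCIDENT_MANAGEMENT", "TSDB_CONSOLIDATION"].map
        (fun k => (k, (3:Int), "graph"))) ++
      (["TIME", "SECRETS", "AUTHENTICATION", "RESOURCE_MONITOR", "DATABASE_MAINTENANCE",
        "INITIALIZATION", "SHUTDOWN"].map (fun k => (k, (4:Int), "infrastructure"))) ++
      (["WISE_AUTHORITY", "ADAPTIVE_FILTER", "VISIBILITY", "SELF_OBSERVATION"].map
        (fun k => (k, (5:Int), "governance"))) := by rfl
  rw [hr]
  simp only [List.foldl_append]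
  rw [pvGroup s 0 "tool"]
  by_cases h1 : PySem.Str.isIn "TOOL" s = true
  · have g1 : (["TOOL"].any (fun k => PySem.Str.isIn k s)) = true := by
      simp only [List.any_cons, List.any_nil, Bool.or_false]; exact h1
    rw [if_pos g1, pvStuck, pvStuck, pvStuck, pvStuck, pvStuck]
    · rw [if_pos h1]
    all_goals (intro r hq; fin_cases hq <;> simp)
  · have g1 : ¬ (["TOOL"].any (fun k => PySem.Str.isIn k s)) = true := by simpa using h1
    rw [if_neg g1, pvGroup s 1 "adapter", if_neg h1]
    by_cases h2 : PySem.Str.isIn "COMMUNICATION" s = true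
    · have g2 : (["COMMUNICATION"].any (fun k => PySem.Str.isIn k s)) = true := by
        simp only [List.any_cons, List.any_nil, Bool.or_false]; exact h2
      rw [if_pos g2, pvStuck, pvStuck, pvStuck, pvStuck]
      · rw [if_pos h2]
      all_goals (intro r hq; fin_cases hq <;> simp)
    · have g2 : ¬ (["COMMUNICATION"].any (fun k => PySem.Str.isIn k s)) = true := by simpa using h2
      rw [if_neg g2, pvGroup s 2 "runtime", if_neg h2]
      by_cases h3 : (["LLM", "RUNTIME_CONTROL", "TASK_SCHEDULER"].any
          (fun service => PySem.Str.isIn service s)) = true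
      · rw [if_pos h3, if_pos h3, pvStuck, pvStuck, pvStuck]
        all_goals (intro r hq; fin_cases hq <;> simp)
      · rw [if_neg h3, if_neg h3, pvGroup s 3 "graph"]
        by_cases h4 : (["MEMORY", "CONFIG", "TELEMETRY", "AUDIT", "INCIDENT_MANAGEMENT",
            "TSDB_CONSOLIDATION"].any (fun service => PySem.Str.isIn service s)) = true
        · rw [if_pos h4, if_pos h4, pvStuck, pvStuck]
          all_goals (intro r hq; fin_cases hq <;> simp)
        · rw [if_neg h4, if_neg h4, pvGroup s 4 "infrastructure"]
          by_cases h5 : (["TIME", "SECRETS", "AUTHENTICATION", "RESOURCE_MONITOR",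
              "DATABASE_MAINTENANCE", "INITIALIZATION", "SHUTDOWN"].any
              (fun service => PySem.Str.isIn service s)) = true
          · rw [if_pos h5, if_pos h5, pvStuck]
            all_goals (intro r hq; fin_cases hq <;> simp)
          · rw [if_neg h5, if_neg h5, pvGroup s 5 "governance"]
            by_cases h6 : (["WISE_AUTHORITY", "ADAPTIVE_FILTER", "VISIBILITY",
                "SELF_OBSERVATION"].any (fun service => PySem.Str.isIn service s)) = true
            · rw [if_pos h6, if_pos h6]
            · rw [if_neg h6, if_neg h6]
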